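-- pv_equiv track=rewrite | github.com/andgineer/dinary | src/dinary/tools/report_helpers.py | extract_format_flags
-- ===== SOURCE A (Python) =====
-- def extract_format_flags(flags: list[str]) -> tuple[bool, bool, list[str]]:
--     """Split ``flags`` into ``(as_csv, as_json, remaining)``.
--
--     ``--csv`` / ``--json`` select the local output format and are
--     consumed here. Filters (``--year``, ``--month``, ...) stay in
--     ``remaining`` and travel through to the remote report module
--     (they affect which rows come back). The remote always runs in
--     JSON mode; ``--csv`` / ``--json`` never reach it.
--     """
--     as_csv = False
--     as_json = False
--     remaining: list[str] = []
--     for flag in flags: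
--         if flag == "--csv":
--             as_csv = True
--         elif flag == "--json":
--             as_json = True
--         else:
--             remaining.append(flag)
--     return as_csv, as_json, remaining
-- ===== SOURCE B (Python) =====
-- def extract_format_flags(flags: list[str]) -> tuple[bool, bool, list[str]]:
--     """Delete the format flags from a copy; membership tells whether each was present."""
--     remaining = list(flags)
--     as_csv = False
--     as_json = False
--     while "--csv" in remaining:
--         as_csv = True
--         remaining.remove("--csv")
--     while "--json" in remaining:
--         as_json = True
--         remaining.remove("--json")
--     return as_csv, as_json, remaining
-- ===== Notes on version B (the rewrite author's own statement) =====
-- stated objective: alternative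
-- what changed: Replaced A's single forward scan with three accumulators by deletion from a copy: two while-loops that test membership and remove() every occurrence of each format flag, the remaining list being what survives.
import Mathlib
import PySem

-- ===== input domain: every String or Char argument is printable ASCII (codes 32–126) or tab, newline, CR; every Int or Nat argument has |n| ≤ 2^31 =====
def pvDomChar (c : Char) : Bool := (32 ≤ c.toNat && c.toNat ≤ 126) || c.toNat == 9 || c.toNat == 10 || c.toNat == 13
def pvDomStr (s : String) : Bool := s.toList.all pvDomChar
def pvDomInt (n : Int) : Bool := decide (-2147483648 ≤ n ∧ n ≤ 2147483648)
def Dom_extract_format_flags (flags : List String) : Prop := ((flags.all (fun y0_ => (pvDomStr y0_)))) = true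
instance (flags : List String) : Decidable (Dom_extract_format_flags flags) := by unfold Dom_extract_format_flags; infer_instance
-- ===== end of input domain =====

-- B replaces A's single accumulating scan by deletion from a copy: two while-loops that
-- test membership and remove() each format flag; same values, alternative algorithm.

-- ===== PORT A =====
-- literal transliteration of A's single loop carrying (as_csv, as_json, remaining)
def extract_format_flags (flags : List String) : Bool × Bool × List String :=
  flags.foldl (fun (st : Bool × Bool × List String) flag =>
    if flag == "--csv" then (true, st.2.1, st.2.2)
    else if flag == "--json" then (st.1, true, st.2.2)
    else (st.1, st.2.1, st.2.2 ++ [flag])) (false, false, [])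

-- ===== PORT B =====
-- one Python 'while target in xs: flag = True; xs.remove(target)' loop; b carries the flag
def drainFlag (target : String) (b : Bool) (xs : List String) : Bool × List String :=
  if target ∈ xs then
    match hr : PySem.List.remove? xs target with
    | some xs' => drainFlag target true xs'
    | none => (b, xs)   -- unreachable: remove? succeeds when target ∈ xs
  else (b, xs)
termination_by xs.length
decreasing_by
  have hm : target ∈ xs := by assumption
  have := PySem.List.remove?_eq_some_erase (v := target) (xs := xs) hm
  rw [this] at hr
  cases hr
  have hpos : 0 < xs.length := List.length_pos_of_mem hm
  rw [List.length_erase_of_mem hm]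
  omega

def extract_format_flags_alt (flags : List String) : Bool × Bool × List String :=
  let remaining := flags                               -- list(flags): a copy
  let r1 := drainFlag "--csv" false remaining          -- while "--csv" in remaining: ...
  let r2 := drainFlag "--json" false r1.2              -- while "--json" in remaining: ...
  (r1.1, r2.1, r2.2)

-- ===== PRECONDITION & SPEC =====
def Spec_extract_format_flags (flags : List String) (out : Bool × Bool × List String) : Prop := out = extract_format_flags_alt flags
instance (flags : List String) (out : Bool × Bool × List String) : Decidable (Spec_extract_format_flags flags out) := by unfold Spec_extract_format_flags; infer_instance

-- ===== CLAIM =====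
def Claim_equal_extract_format_flags : Prop := ∀ (flags : List String), Dom_extract_format_flags flags → Spec_extract_format_flags flags (extract_format_flags flags)

-- ===== LEMMAS AND PROOFS =====

-- erasing one occurrence of t does not change the t-free filtrate
theorem filter_erase_ne (t : String) (xs : List String) (h : t ∈ xs) :
    (xs.erase t).filter (fun x => !(x == t)) = xs.filter (fun x => !(x == t)) := by
  induction xs with
  | nil => cases h
  | cons x xs ih =>
    by_cases hx : x = t
    · subst hx
      simp [List.erase_cons_head, List.filter_cons]
    · have hxs : t ∈ xs := by
        rcases List.mem_cons.mp h with h1 | h1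
        · exact absurd h1.symm hx
        · exact h1
      rw [List.erase_cons_tail (by simp [hx])]
      simp only [List.filter_cons]
      rw [ih hxs]

-- characterisation of the while-loop: flag ← b ∨ membership, list ← t-free filtrate
theorem drainFlag_eq (t : String) (b : Bool) (xs : List String) :
    drainFlag t b xs = (b || xs.contains t, xs.filter (fun x => !(x == t))) := by
  induction hn : xs.length using Nat.strong_induction_on generalizing b xs with
  | _ n ih =>
  rw [drainFlag]
  by_cases hm : t ∈ xs
  · rw [if_pos hm]
    split
    · rename_i xs' hr
      rw [PySem.List.remove?_eq_some_erase (v := t) (xs := xs) hm] at hr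
      cases hr
      have hlt : (xs.erase t).length < n := by
        subst hn
        have hpos : 0 < xs.length := List.length_pos_of_mem hm
        rw [List.length_erase_of_mem hm]; omega
      rw [ih _ hlt true (xs.erase t) rfl, filter_erase_ne t xs hm]
      simp [List.contains_iff_mem, hm]
    · rename_i hr
      rw [PySem.List.remove?_eq_some_erase (v := t) (xs := xs) hm] at hr
      cases hr
  · rw [if_neg hm]
    have : xs.filter (fun x => !(x == t)) = xs :=
      List.filter_eq_self.mpr (fun a ha => by simp; intro he; exact hm (he ▸ ha))
    simp [List.contains_iff_mem, hm, this]

-- loop invariant for A's fold from a general state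
theorem effA_loop (flags : List String) (c j : Bool) (acc : List String) :
    flags.foldl (fun (st : Bool × Bool × List String) flag =>
      if flag == "--csv" then (true, st.2.1, st.2.2)
      else if flag == "--json" then (st.1, true, st.2.2)
      else (st.1, st.2.1, st.2.2 ++ [flag])) (c, j, acc)
    = (c || flags.contains "--csv", j || flags.contains "--json",
       acc ++ flags.filter (fun f => !(f == "--csv" || f == "--json"))) := by
  induction flags generalizing c j acc with
  | nil => simp
  | cons x xs ih =>
    rw [List.foldl_cons]
    by_cases hc : x = "--csv"
    · subst hc
      rw [if_pos (show (("--csv":String) == "--csv") = true from rfl), ih]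
      simp
    · by_cases hj : x = "--json"
      · subst hj
        rw [if_neg (by simp), if_pos (show (("--json":String) == "--json") = true from rfl), ih]
        simp [hc]
      · rw [if_neg (by simp [hc]), if_neg (by simp [hj]), ih]
        simp [hc, hj, Ne.symm hc, Ne.symm hj]

-- ===== VERDICT =====
theorem extract_format_flags_spec : Claim_equal_extract_format_flags := by
  intro flags _
  unfold Spec_extract_format_flags extract_format_flags extract_format_flags_alt
  rw [effA_loop]
  simp only [drainFlag_eq]
  refine congrArg₂ Prod.mk (by simp) (congrArg₂ Prod.mk ?_ ?_)
  · -- "--json" membership unaffected by removing "--csv"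
    simp [List.contains_iff_mem, List.mem_filter]
  · rw [List.filter_filter]
    exact (List.filter_congr (fun x _ => by
      cases hb : (x == "--csv") <;> cases hb2 : (x == "--json") <;> simp [hb, hb2])).symm
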